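-- pv_equiv track=rewrite | github.com/yinwang0/pysonar2 | src/main/resources/org/yinwang/pysonar/python/dump_python.py | map_line_col
-- ===== SOURCE A (Python) =====
-- def map_line_col(idxmap, idx):
--     line = 0
--     for start in idxmap:
--         if idx < start:
--             break
--         line += 1
--     col = idx - idxmap[line-1]
--     return (line, col)
-- ===== SOURCE B (Python) =====
-- def map_line_col(idxmap, idx):
--     # idxmap is the (nondecreasing) list of line start offsets; binary-search
--     # for the insertion point of idx, i.e. the number of starts <= idx.
--     lo, hi = 0, len(idxmap)
--     while lo < hi:
--         mid = (lo + hi) // 2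
--         if idx < idxmap[mid]:
--             hi = mid
--         else:
--             lo = mid + 1
--     return (lo, idx - idxmap[lo - 1])
-- ===== Notes on version B (the rewrite author's own statement) =====
-- stated objective: faster
-- what changed: Replaces A's linear scan with a binary search for the insertion point of idx; Pre_ restricts to binary search's contract (nonempty idxmap partitioned w.r.t. idx, i.e. entries <= idx precede entries > idx, as any sorted line-start map is; the empty map makes A raise IndexError).
-- outside the precondition, e.g. on map_line_col([5, 1], 3): A returns (0, 2), B returns (2, 2)
import Mathlib
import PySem

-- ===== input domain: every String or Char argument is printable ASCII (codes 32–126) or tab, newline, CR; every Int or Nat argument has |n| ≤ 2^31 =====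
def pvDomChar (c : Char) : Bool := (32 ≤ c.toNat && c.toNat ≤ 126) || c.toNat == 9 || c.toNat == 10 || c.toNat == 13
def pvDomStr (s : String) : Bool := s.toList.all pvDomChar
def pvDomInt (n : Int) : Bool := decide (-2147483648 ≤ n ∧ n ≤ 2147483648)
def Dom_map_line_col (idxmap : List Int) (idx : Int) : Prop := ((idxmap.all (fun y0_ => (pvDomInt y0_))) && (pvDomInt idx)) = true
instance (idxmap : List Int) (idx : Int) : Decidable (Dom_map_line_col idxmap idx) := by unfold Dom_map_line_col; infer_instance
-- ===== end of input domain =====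

-- B replaces A's linear scan by a binary search for the insertion point of idx
-- (O(log n) instead of O(n)); Pre_ restricts to nonempty nondecreasing maps.

-- ===== PORT A =====
-- the for-loop with break: walk the list, stop at the first start with idx < start
def mlcLoop (idx : Int) : List Int → Int → Int
  | [], line => line
  | start :: rest, line => if idx < start then line else mlcLoop idx rest (line + 1)

def map_line_col (idxmap : List Int) (idx : Int) : List Int :=
  let line := mlcLoop idx idxmap 0
  -- idxmap[line-1]: Python indexing (negative from the end); raises only on [] (excluded by Pre_)
  let col := idx - PySem.List.pyGetD idxmap (line - 1) 0
  [line, col]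

-- ===== PORT B =====
-- Source B's while-loop: classic binary search for the insertion point
def bsLoop (idxmap : List Int) (idx : Int) (lo hi : Int) : Int :=
  if lo < hi then
    let mid := PySem.Int.floordiv (lo + hi) 2
    if idx < PySem.List.pyGetD idxmap mid 0 then bsLoop idxmap idx lo mid
    else bsLoop idxmap idx (mid + 1) hi
  else lo
termination_by (hi - lo).toNat
decreasing_by
  · have h := PySem.Int.floordiv_two_mid_bounds (lo := lo) (hi := hi) (by omega)
    have h2 : PySem.Int.floordiv (lo + hi) 2 = (lo + hi) / 2 :=
      PySem.Int.floordiv_eq_ediv_of_pos (by omega)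
    omega
  · have h := PySem.Int.floordiv_two_mid_bounds (lo := lo) (hi := hi) (by omega)
    omega

def map_line_col_alt (idxmap : List Int) (idx : Int) : List Int :=
  let line := bsLoop idxmap idx 0 (idxmap.length : Int)
  [line, idx - PySem.List.pyGetD idxmap (line - 1) 0]

-- ===== PRECONDITION & SPEC =====
-- Pre_ is binary search's contract (the same as bisect's): idxmap is partitioned w.r.t. idx —
-- every entry ≤ idx precedes every entry > idx — which every (sorted) line-start map satisfies;
-- on a non-partitioned list A's scan and B's search differ (e.g. ([5,1],3)), and on the empty
-- map both A and B raise IndexError (idxmap[-1]).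
def Pre_map_line_col (idxmap : List Int) (idx : Int) : Prop :=
  idxmap ≠ [] ∧
    ((idxmap.dropWhile (fun s => decide (s ≤ idx))).all (fun s => decide (idx < s)) = true)
instance (idxmap : List Int) (idx : Int) : Decidable (Pre_map_line_col idxmap idx) := by
  unfold Pre_map_line_col; infer_instance
def pvWitness_map_line_col : List Int × Int := ([0, 10, 25], 12)

def Spec_map_line_col (idxmap : List Int) (idx : Int) (out : List Int) : Prop := out = map_line_col_alt idxmap idx
instance (idxmap : List Int) (idx : Int) (out : List Int) : Decidable (Spec_map_line_col idxmap idx out) := by unfold Spec_map_line_col; infer_instance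

-- ===== CLAIM (what is proved, stated in full; the proofs are below) =====
def Claim_equal_map_line_col : Prop := ∀ (idxmap : List Int) (idx : Int), Dom_map_line_col idxmap idx → Pre_map_line_col idxmap idx → Spec_map_line_col idxmap idx (map_line_col idxmap idx)

-- ===== LEMMAS AND PROOFS =====

-- A's loop counts the takeWhile (· ≤ idx) prefix
theorem mlcLoop_eq (idx : Int) (l : List Int) (c : Int) :
    mlcLoop idx l c = c + ((l.takeWhile (fun s => decide (s ≤ idx))).length : Int) := by
  induction l generalizing c with
  | nil => simp [mlcLoop]
  | cons a t ih =>
    by_cases h : idx < a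
    · have : ¬ (a ≤ idx) := by omega
      simp [mlcLoop, h, List.takeWhile, this]
    · have : a ≤ idx := by omega
      simp [mlcLoop, h, List.takeWhile, this, ih]
      omega

theorem takeWhile_len_le (l : List Int) (idx : Int) :
    (l.takeWhile (fun s => decide (s ≤ idx))).length ≤ l.length := by
  simpa using List.IsPrefix.length_le (List.takeWhile_prefix _)

-- every element strictly before the takeWhile boundary satisfies the predicate
theorem before_boundary (l : List Int) (idx : Int) (m : Nat)
    (hm : m < (l.takeWhile (fun s => decide (s ≤ idx))).length)
    (hml : m < l.length) : l[m] ≤ idx := by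
  induction l generalizing m with
  | nil => simp at hml
  | cons a t ih =>
    by_cases ha : a ≤ idx
    · cases m with
      | zero => simpa using ha
      | succ j =>
        simp only [List.takeWhile, ha, decide_true, List.length_cons] at hm
        exact ih j (by omega) (by simpa using hml)
    · simp [List.takeWhile, ha] at hm

-- B's binary search converges to the takeWhile boundary on a partitioned list
theorem bsLoop_eq (l : List Int) (idx : Int)
    (hs : (l.dropWhile (fun s => decide (s ≤ idx))).all (fun s => decide (idx < s)) = true) :
    ∀ (n : Nat) (lo hi : Int), (hi - lo).toNat ≤ n → 0 ≤ lo → hi ≤ (l.length : Int) →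
      lo ≤ ((l.takeWhile (fun s => decide (s ≤ idx))).length : Int) →
      ((l.takeWhile (fun s => decide (s ≤ idx))).length : Int) ≤ hi →
      bsLoop l idx lo hi = ((l.takeWhile (fun s => decide (s ≤ idx))).length : Int) := by
  have hsuffix : ∀ (j : Nat) (hj : j < l.length),
      (l.takeWhile (fun s => decide (s ≤ idx))).length ≤ j → idx < l[j] := by
    intro j hj hkj
    set p := (fun s : Int => decide (s ≤ idx)) with hp
    have hsplit : l.takeWhile p ++ l.dropWhile p = l := List.takeWhile_append_dropWhile
    have hlen : (l.takeWhile p).length + (l.dropWhile p).length = l.length := by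
      rw [← List.length_append, hsplit]
    have hjd : l[j] = (l.dropWhile p)[j - (l.takeWhile p).length]'(by omega) := by
      rw [List.getElem_of_eq hsplit.symm hj, List.getElem_append_right hkj]
    have hmem : (l.dropWhile p)[j - (l.takeWhile p).length]'(by omega) ∈ l.dropWhile p :=
      List.getElem_mem _
    have := (List.all_eq_true.mp hs) _ hmem
    rw [hjd]
    exact of_decide_eq_true this
  intro n
  induction n with
  | zero =>
    intro lo hi hn _ _ hlok hkhi
    rw [bsLoop, if_neg (by omega)]
    omega
  | succ n ih =>
    intro lo hi hn hlo hhi hlok hkhi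
    set k := (l.takeWhile (fun s => decide (s ≤ idx))).length with hk
    by_cases hlt : lo < hi
    · rw [bsLoop, if_pos hlt]
      show (if idx < PySem.List.pyGetD l (PySem.Int.floordiv (lo + hi) 2) 0 then
              bsLoop l idx lo (PySem.Int.floordiv (lo + hi) 2)
            else bsLoop l idx (PySem.Int.floordiv (lo + hi) 2 + 1) hi) = ((k : Nat) : Int)
      have hmid := PySem.Int.floordiv_two_mid_bounds (lo := lo) (hi := hi) (by omega)
      have hmidlt : PySem.Int.floordiv (lo + hi) 2 < hi := by
        rw [PySem.Int.floordiv_eq_ediv_of_pos (by omega)]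
        omega
      set mid := PySem.Int.floordiv (lo + hi) 2 with hmiddef
      have hmidlen : mid.toNat < l.length := by omega
      have hget : PySem.List.pyGetD l mid 0 = l[mid.toNat] :=
        PySem.List.pyGetD_eq_getElem l 0 (by omega) (by omega)
      by_cases hc : idx < PySem.List.pyGetD l mid 0
      · rw [if_pos hc]
        -- new interval (lo, mid): k ≤ mid
        have hkmid : (k : Int) ≤ mid := by
          by_contra hcon
          have : l[mid.toNat] ≤ idx :=
            before_boundary l idx mid.toNat (by omega) hmidlen
          rw [hget] at hc; omega
        exact ih lo mid (by omega) hlo (by omega) hlok hkmid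
      · rw [if_neg hc]
        -- new interval (mid+1, hi): mid + 1 ≤ k
        have hkmid : mid + 1 ≤ (k : Int) := by
          by_contra hcon
          have h1 : idx < l[mid.toNat] := hsuffix mid.toNat hmidlen (by omega)
          rw [hget] at hc; omega
        exact ih (mid + 1) hi (by omega) (by omega) hhi hkmid hkhi
    · rw [bsLoop, if_neg hlt]; omega

-- ===== VERDICT (by name: the statement is the Claim_ definition above) =====
theorem map_line_col_spec : Claim_equal_map_line_col := by
  intro idxmap idx _hdom hpre
  unfold Spec_map_line_col map_line_col map_line_col_alt
  have hk := takeWhile_len_le idxmap idx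
  have hmlc : mlcLoop idx idxmap 0 =
      ((idxmap.takeWhile (fun s => decide (s ≤ idx))).length : Int) := by
    rw [mlcLoop_eq]; ring
  have hbs := bsLoop_eq idxmap idx hpre.2 (idxmap.length) 0 (idxmap.length : Int)
    (by omega) (by omega) le_rfl (by omega) (by omega)
  rw [hmlc, hbs]
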